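-- pv_equiv track=rewrite | github.com/paiml/depyler | examples/hard_pathological_control5.py | count_truth_combos
-- ===== SOURCE A (Python) =====
-- def count_truth_combos(vals: list[int]) -> int:
--     """Count how many adjacent pairs are both positive (both 'true')."""
--     count: int = 0
--     i: int = 0
--     while i + 1 < len(vals):
--         if vals[i] > 0 and vals[i + 1] > 0:
--             count = count + 1
--         i = i + 1
--     return count
-- ===== SOURCE B (Python) =====
-- def count_truth_combos(vals: list[int]) -> int:
--     """Count adjacent pairs both positive = (# positives) - (# maximal positive runs)."""
--     positives = 0
--     run_starts = 0
--     prev_pos = False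
--     for v in vals:
--         if v > 0:
--             positives += 1
--             if not prev_pos:
--                 run_starts += 1
--             prev_pos = True
--         else:
--             prev_pos = False
--     return positives - run_starts
-- ===== Notes on version B (the rewrite author's own statement) =====
-- stated objective: alternative
-- what changed: B never compares neighbouring elements: one for-loop over values counting positives and maximal positive-run starts, returning positives - run_starts (identity pairs = positives - runs); avoids A's index-based while loop with two subscript reads per step.
import Mathlib
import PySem

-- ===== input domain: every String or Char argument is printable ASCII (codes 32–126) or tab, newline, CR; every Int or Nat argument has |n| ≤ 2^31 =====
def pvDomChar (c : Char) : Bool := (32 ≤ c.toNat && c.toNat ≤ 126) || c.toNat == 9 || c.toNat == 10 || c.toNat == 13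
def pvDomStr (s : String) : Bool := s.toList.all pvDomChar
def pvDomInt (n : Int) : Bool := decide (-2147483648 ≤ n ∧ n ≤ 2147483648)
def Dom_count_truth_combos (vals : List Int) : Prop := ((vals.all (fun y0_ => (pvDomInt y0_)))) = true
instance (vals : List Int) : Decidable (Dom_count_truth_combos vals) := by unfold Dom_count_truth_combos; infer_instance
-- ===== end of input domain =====

-- B replaces A's neighbour-pair test by the identity pairs = positives - run_starts (one pass, no pair comparison); same O(n) cost.

-- ===== PORT A =====
-- A's while loop over index i with accumulator count
def countA_loop (vals : List Int) (count : Int) (i : Nat) : Int :=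
  if h : i + 1 < vals.length then
    countA_loop vals
      (if vals[i]'(by omega) > 0 ∧ vals[i + 1]'h > 0 then count + 1 else count)
      (i + 1)
  else count
termination_by vals.length - i

def count_truth_combos (vals : List Int) : Int :=
  countA_loop vals 0 0

-- ===== PORT B =====
-- one fold maintaining (positives, run_starts, prev_pos)
def stepB (st : Int × Int × Bool) (v : Int) : Int × Int × Bool :=
  let (p, r, prev) := st
  if v > 0 then (p + 1, (if prev then r else r + 1), true)
  else (p, r, false)

def count_truth_combos_alt (vals : List Int) : Int :=
  let st := vals.foldl stepB (0, 0, false)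
  st.1 - st.2.1

-- ===== PRECONDITION & SPEC =====
def Spec_count_truth_combos (vals : List Int) (out : Int) : Prop := out = count_truth_combos_alt vals
instance (vals : List Int) (out : Int) : Decidable (Spec_count_truth_combos vals out) := by unfold Spec_count_truth_combos; infer_instance

-- ===== CLAIM (what is proved, stated in full; the proofs are below) =====
def Claim_equal_count_truth_combos : Prop := ∀ (vals : List Int), Dom_count_truth_combos vals → Spec_count_truth_combos vals (count_truth_combos vals)

-- ===== LEMMAS AND PROOFS =====

-- reference count: adjacent-positive pairs of a list
def pairs : List Int → Int
  | x :: y :: rest => (if x > 0 ∧ y > 0 then 1 else 0) + pairs (y :: rest)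
  | _ => 0

lemma pairs_head_nonpos {x : Int} (hx : ¬ x > 0) (l : List Int) :
    pairs (x :: l) = pairs l := by
  cases l with
  | nil => rfl
  | cons z rest => simp [pairs, hx]

lemma pairs_head_pos {x x' : Int} (hx : x > 0) (hx' : x' > 0) (l : List Int) :
    pairs (x :: l) = pairs (x' :: l) := by
  cases l with
  | nil => rfl
  | cons z rest => simp [pairs, hx, hx']

lemma countA_loop_eq (vals : List Int) :
    ∀ (n i : Nat) (count : Int), vals.length - i ≤ n →
      countA_loop vals count i = count + pairs (vals.drop i) := by
  intro n
  induction n with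
  | zero =>
      intro i count h
      have hni : ¬ (i + 1 < vals.length) := by omega
      rw [countA_loop, dif_neg hni]
      have : vals.drop i = [] := List.drop_eq_nil_of_le (by omega)
      simp [this, pairs]
  | succ n ih =>
      intro i count h
      by_cases hlt : i + 1 < vals.length
      · rw [countA_loop, dif_pos hlt]
        rw [ih (i + 1) _ (by omega)]
        have hd : vals.drop i = vals[i]'(by omega) :: vals.drop (i + 1) :=
          List.drop_eq_getElem_cons (by omega)
        have hd2 : vals.drop (i + 1) = vals[i + 1]'hlt :: vals.drop (i + 2) :=
          List.drop_eq_getElem_cons hlt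
        rw [hd, hd2, pairs]
        split_ifs with hp
        · ring
        · ring
      · rw [countA_loop, dif_neg hlt]
        rcases Nat.lt_or_ge i vals.length with hi | hi
        · have : i + 1 = vals.length := by omega
          have hd : vals.drop i = [vals[i]'hi] := by
            rw [List.drop_eq_getElem_cons hi]
            have : vals.drop (i + 1) = [] := List.drop_eq_nil_of_le (by omega)
            rw [this]
          simp [hd, pairs]
        · have : vals.drop i = [] := List.drop_eq_nil_of_le hi
          simp [this, pairs]

lemma foldB_eq (l : List Int) :
    ∀ (p r : Int) (prev : Bool),
      (l.foldl stepB (p, r, prev)).1 - (l.foldl stepB (p, r, prev)).2.1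
      = p - r + (if prev then pairs ((1 : Int) :: l) else pairs l) := by
  induction l with
  | nil => intro p r prev; cases prev <;> simp [pairs]
  | cons v rest ih =>
      intro p r prev
      simp only [List.foldl_cons]
      by_cases hv : v > 0
      · cases prev with
        | true =>
            rw [show stepB (p, r, true) v = (p + 1, r, true) from by simp [stepB, hv]]
            rw [ih (p + 1) r true]
            have h1 : pairs ((1 : Int) :: rest) = pairs (v :: rest) :=
              pairs_head_pos (by norm_num) hv rest
            simp [pairs, hv, h1]
            ring
        | false =>
            rw [show stepB (p, r, false) v = (p + 1, r + 1, true) from by simp [stepB, hv]]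
            rw [ih (p + 1) (r + 1) true]
            have h1 : pairs ((1 : Int) :: rest) = pairs (v :: rest) :=
              pairs_head_pos (by norm_num) hv rest
            simp [h1]
      · cases prev with
        | true =>
            rw [show stepB (p, r, true) v = (p, r, false) from by simp [stepB, hv]]
            rw [ih p r false]
            simp [pairs, hv, pairs_head_nonpos hv]
        | false =>
            rw [show stepB (p, r, false) v = (p, r, false) from by simp [stepB, hv]]
            rw [ih p r false]
            simp [pairs_head_nonpos hv]

-- ===== VERDICT (by name: the statement is the Claim_ definition above) =====
theorem count_truth_combos_spec : Claim_equal_count_truth_combos := by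
  intro vals _
  unfold Spec_count_truth_combos count_truth_combos count_truth_combos_alt
  rw [countA_loop_eq vals vals.length 0 0 (by omega)]
  simp only []
  rw [foldB_eq vals 0 0 false]
  simp
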